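-- pv_equiv track=rewrite | github.com/mathorlee/leetcode-clt | ac/minimum-incompatibility.py | calculate_cuts
-- ===== SOURCE A (Python) =====
-- def calculate_cuts(nums: list[int], k: int) -> int:
--     # begin
--     from collections import defaultdict
--     from functools import lru_cache
--     from itertools import combinations
--     from math import inf
--
--     # illegal case
--     d = defaultdict(int)
--     for _ in nums:
--         d[_] += 1
--         if d[_] > k:
--             return -1
--
--     # general casese
--     n, m = len(nums), len(nums) // k
--     d = {}  # d[mask] = (max_num - min_num) and mask has m one bit.
--     for indices in combinations(range(n), m):
--         mask = 0
--         s = set()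
--         for _ in indices:
--             mask |= (1 << _)
--             s.add(nums[_])
--         if len(s) == m:
--             d[mask] = max(s) - min(s)
--
--     @lru_cache(maxsize=None)
--     def dfs(mask: int) -> int:
--         res = inf
--         if mask in d:
--             return d[mask]
--
--         for sub_mask in d:
--             if mask & sub_mask == sub_mask:
--                 res = min(res, d[sub_mask] + dfs(mask ^ sub_mask))
--
--         return res  # type: ignore
--
--     res = dfs((1 << n) - 1)
--     return res if res < inf else -1
-- ===== SOURCE B (Python) =====
-- def calculate_cuts(nums: list[int], k: int) -> int:
--     # count check: any value appearing more than k times makes it impossible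
--     cnt = {}
--     for x in nums:
--         cnt[x] = cnt.get(x, 0) + 1
--     if any(cnt[x] > k for x in cnt):
--         return -1
--
--     n, m = len(nums), len(nums) // k
--     INF = float("inf")
--
--     # cost[mask] for every m-bit mask whose selected values are pairwise distinct
--     d = {}
--     for mask in range(1, 1 << n):
--         if mask.bit_count() == m:
--             vals = {nums[i] for i in range(n) if mask >> i & 1}
--             if len(vals) == m:
--                 d[mask] = max(vals) - min(vals)
--
--     def low_index(x: int) -> int:
--         return 0 if x & 1 else 1 + low_index(x >> 1)
--
--     # group the valid masks by their lowest set bit; in the DP below only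
--     # blocks containing the lowest set bit of the remaining mask are tried.
--     by_low = {}
--     for key in d:
--         by_low.setdefault(low_index(key), []).append(key)
--
--     from functools import lru_cache
--
--     @lru_cache(maxsize=None)
--     def best(mask: int) -> int:
--         if mask == 0:
--             return 0
--         res = INF
--         for key in by_low.get(low_index(mask), []):
--             if key & mask == key:
--                 r = best(mask ^ key)
--                 if d[key] + r < res:
--                     res = d[key] + r
--         return res
--
--     r = best((1 << n) - 1)
--     return r if r != INF else -1
-- ===== Notes on version B (the rewrite author's own statement) =====
-- stated objective: alternative
-- what changed: A scans the entire dict of valid m-subsets at every DP state; B builds the dict by popcount-filtered mask enumeration, groups the valid blocks by their lowest set bit, and at each state tries only the blocks whose lowest bit equals the lowest set bit of the remaining mask (intended as faster per state; both stay exponential overall, so no speed is claimed).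
-- crash fix: On nums = [] with k != 0 the Python A raises ValueError (max() of the empty set), where B returns 0; for 0 < k with len(nums) < k A raises the same ValueError, where B returns -1 (no valid block exists). — e.g. on calculate_cuts([1], 2): A raises ValueError, B returns -1
import Mathlib
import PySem

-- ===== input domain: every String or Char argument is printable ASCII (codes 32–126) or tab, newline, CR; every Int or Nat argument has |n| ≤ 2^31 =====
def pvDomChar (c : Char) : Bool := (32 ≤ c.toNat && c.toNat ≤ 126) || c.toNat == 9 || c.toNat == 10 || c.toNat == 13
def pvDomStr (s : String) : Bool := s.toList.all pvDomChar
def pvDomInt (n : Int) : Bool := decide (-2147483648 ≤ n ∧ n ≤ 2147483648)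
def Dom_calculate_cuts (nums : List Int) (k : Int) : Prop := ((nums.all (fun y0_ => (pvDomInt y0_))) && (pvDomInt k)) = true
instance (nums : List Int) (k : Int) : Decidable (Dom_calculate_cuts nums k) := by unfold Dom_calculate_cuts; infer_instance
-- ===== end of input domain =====

-- B re-implements the partition DP fixing the lowest set bit of the remaining mask, trying only
-- the valid blocks grouped under that bit instead of A's scan of every valid block at every state.

-- ---- small helpers shared by both ports ----

-- nums[i] for an index 0 ≤ i < len(nums) produced by range(n) (exact there)
def ccNth (nums : List Int) (i : Nat) : Int := (PySem.List.pyGet? nums (i : Int)).getD 0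

-- float('inf') is represented by `none`; `min` of possibly-infinite intermediate results
def ccOptMin : Option Int → Option Int → Option Int
  | none, b => b
  | some x, none => some x
  | some x, some y => some (min x y)

-- ===== PORT A =====

-- the defaultdict counting loop with the early `return -1` (true = returned -1)
def ccDupLoopA (k : Int) : List Int → PySem.Dict Int Int → Bool
  | [], _ => false
  | x :: rest, d =>
    let d' := d.modify x 0 (· + 1)          -- d[_] += 1
    if k < d'.getD x 0 then true            -- if d[_] > k: return -1
    else ccDupLoopA k rest d'

-- itertools.combinations(l, r) in lexicographic order
def ccCombos : Nat → List Nat → List (List Nat)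
  | 0, _ => [[]]
  | _ + 1, [] => []
  | r + 1, x :: xs => (ccCombos r xs).map (x :: ·) ++ ccCombos (r + 1) xs

-- the d-building loop: mask and the value set grow together over `indices`
def ccBuildA (nums : List Int) (m : Nat) (combosList : List (List Nat)) : PySem.Dict Nat Int :=
  combosList.foldl (fun d indices =>
    let p := indices.foldl
      (fun p i => (p.1 ||| (1 <<< i), PySem.Set.add p.2 (ccNth nums i)))
      (0, (PySem.Set.empty : PySem.Set Int))
    if p.2.length = m then
      d.insert p.1 ((PySem.List.max? p.2 (fun v => v)).getD 0 - (PySem.List.min? p.2 (fun v => v)).getD 0)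
    else d) PySem.Dict.empty

-- dfs(mask), including its `if mask in d` shortcut; the inner `for sub_mask in d` loop is the fold.
-- `fuel` only establishes totality: dfs's recursion depth is bounded by mask (each call strictly
-- decreases it), so with the fuel the caller passes the 0-case is never reached on admitted inputs.
def ccDfsF : Nat → PySem.Dict Nat Int → Nat → Option Int
  | 0, _, _ => none
  | fuel + 1, d, mask =>
    match d.get? mask with
    | some w => some w
    | none =>
      d.keys.foldl (fun res s =>
        if s &&& mask = s then
          ccOptMin res ((ccDfsF fuel d (mask ^^^ s)).map (fun w => d.getD s 0 + w))
        else res) none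

def calculate_cuts (nums : List Int) (k : Int) : Int :=
  if ccDupLoopA k nums PySem.Dict.empty then -1
  else
    let n := nums.length
    -- m = len(nums) // k; nonnegative whenever this point is reached without raising
    let m := (PySem.Int.floordiv (n : Int) k).toNat
    let d := ccBuildA nums m (ccCombos m (List.range n))
    match ccDfsF (1 <<< n) d ((1 <<< n) - 1) with
    | some v => v                            -- res < inf
    | none => -1                             -- res = inf

-- ===== PORT B =====

-- cnt[x] = cnt.get(x, 0) + 1
def ccCntB (nums : List Int) : PySem.Dict Int Int :=
  nums.foldl (fun d x => d.insert x (d.getD x 0 + 1)) PySem.Dict.empty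

-- int.bit_count(), ported by hand (fuel-structural; fuel = x suffices since x < 2^x)
def ccPopcntF : Nat → Nat → Nat
  | 0, _ => 0
  | fuel + 1, x => if x = 0 then 0 else ccPopcntF fuel (x / 2) + x % 2

def ccPopcnt (x : Nat) : Nat := ccPopcntF x x

-- {nums[i] for i in range(n) if mask >> i & 1}
def ccValsB (nums : List Int) (mask : Nat) : PySem.Set Int :=
  (List.range nums.length).foldl
    (fun s i => if (mask >>> i) &&& 1 = 1 then PySem.Set.add s (ccNth nums i) else s)
    PySem.Set.empty

-- for mask in range(1, 1 << n): …   (range(1, 2^n) = List.range' 1 (2^n - 1))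
def ccBuildB (nums : List Int) (m : Nat) : PySem.Dict Nat Int :=
  (List.range' 1 (2 ^ nums.length - 1)).foldl (fun d mask =>
    if ccPopcnt mask = m then
      let vals := ccValsB nums mask
      if vals.length = m then
        d.insert mask ((PySem.List.max? vals (fun v => v)).getD 0 - (PySem.List.min? vals (fun v => v)).getD 0)
      else d
    else d) PySem.Dict.empty

-- low_index(x); fuel-structural (fuel = x suffices: the answer is at most log2 x; the Python
-- never calls low_index(0): d's keys come from range(1, 1 << n))
def ccLowIdxF : Nat → Nat → Nat
  | 0, _ => 0
  | fuel + 1, x => if x &&& 1 = 1 then 0 else 1 + ccLowIdxF fuel (x >>> 1)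

def ccLowIdx (x : Nat) : Nat := ccLowIdxF x x

-- by_low.setdefault(low_index(key), []).append(key)
def ccByLow (d : PySem.Dict Nat Int) : PySem.Dict Nat (List Nat) :=
  d.keys.foldl (fun bl key => bl.modify (ccLowIdx key) [] (fun ls => ls ++ [key])) PySem.Dict.empty

-- best(mask); only keys grouped under the lowest set bit of mask are tried.
-- `fuel` as in ccDfsF: recursion depth is bounded by mask, the 0-case is never reached.
def ccBestF : Nat → PySem.Dict Nat Int → PySem.Dict Nat (List Nat) → Nat → Option Int
  | 0, _, _, _ => none
  | fuel + 1, d, byLow, mask =>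
    if mask = 0 then some 0
    else
      (byLow.getD (ccLowIdx mask) []).foldl (fun res key =>
        if key &&& mask = key then
          ccOptMin res ((ccBestF fuel d byLow (mask ^^^ key)).map (fun w => d.getD key 0 + w))
        else res) none

def calculate_cuts_alt (nums : List Int) (k : Int) : Int :=
  let cnt := ccCntB nums
  if cnt.keys.any (fun x => decide (k < cnt.getD x 0)) then -1
  else
    let n := nums.length
    let m := (PySem.Int.floordiv (n : Int) k).toNat
    let d := ccBuildB nums m
    let byLow := ccByLow d
    match ccBestF (1 <<< n) d byLow ((1 <<< n) - 1) with
    | some v => v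
    | none => -1

-- ===== PRECONDITION & SPEC =====

-- Pre_ is exactly the set of inputs on which the Python A returns normally: A raises on
-- nums = [] (max() of an empty set, or 0//0 when k = 0) and on 0 < k with fewer than k
-- numbers (the empty combination reaches max(set())); everywhere else A returns.
def Pre_calculate_cuts (nums : List Int) (k : Int) : Prop :=
  nums ≠ [] ∧ (k ≤ 0 ∨ k ≤ (nums.length : Int) ∨ ∃ x ∈ nums, k < (nums.count x : Int))
instance (nums : List Int) (k : Int) : Decidable (Pre_calculate_cuts nums k) := by
  unfold Pre_calculate_cuts; infer_instance

def pvWitness_calculate_cuts : List Int × Int := ([1, 2, 3, 4], 2)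

-- On nums = [] with k ≠ 0 A raises ValueError (max of an empty set) where B returns 0, and for
-- 0 < k with len(nums) < k A raises the same ValueError where B returns -1 (no valid block).
def Raises_calculate_cuts (nums : List Int) (k : Int) : Prop :=
  (nums = [] ∧ k ≠ 0) ∨ (0 < k ∧ (nums.length : Int) < k)
instance (nums : List Int) (k : Int) : Decidable (Raises_calculate_cuts nums k) := by
  unfold Raises_calculate_cuts; infer_instance

def pvRaiseWitness_calculate_cuts : List Int × Int := ([1], 2)
def pvRaiseWitnessOut_calculate_cuts : Int := -1

def Spec_calculate_cuts (nums : List Int) (k : Int) (out : Int) : Prop := out = calculate_cuts_alt nums k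
instance (nums : List Int) (k : Int) (out : Int) : Decidable (Spec_calculate_cuts nums k out) := by
  unfold Spec_calculate_cuts; infer_instance

-- ===== CLAIM (what is proved, stated in full; the proofs are below) =====
def Claim_equal_calculate_cuts : Prop := ∀ (nums : List Int) (k : Int), Dom_calculate_cuts nums k → Pre_calculate_cuts nums k → Spec_calculate_cuts nums k (calculate_cuts nums k)
def Claim_raises_calculate_cuts : Prop := (∀ (nums : List Int) (k : Int), Dom_calculate_cuts nums k → Raises_calculate_cuts nums k → ¬ Pre_calculate_cuts nums k) ∧ (Dom_calculate_cuts (pvRaiseWitness_calculate_cuts.1) (pvRaiseWitness_calculate_cuts.2) ∧ Raises_calculate_cuts (pvRaiseWitness_calculate_cuts.1) (pvRaiseWitness_calculate_cuts.2) ∧ calculate_cuts_alt (pvRaiseWitness_calculate_cuts.1) (pvRaiseWitness_calculate_cuts.2) = pvRaiseWitnessOut_calculate_cuts)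

-- ===== LEMMAS AND PROOFS =====

-- ---- bit-level helpers ----

theorem ccAndSelfOfTestBitImp {s mask : Nat} (h : ∀ i, s.testBit i = true → mask.testBit i = true) :
    s &&& mask = s := by
  apply Nat.eq_of_testBit_eq
  intro i
  rw [Nat.testBit_and]
  cases hs : s.testBit i with
  | false => simp
  | true => simp [h i hs]

theorem ccTestBitImpOfAndSelf {s mask : Nat} (h : s &&& mask = s) :
    ∀ i, s.testBit i = true → mask.testBit i = true := by
  intro i hi
  have hcong := congrArg (fun x => x.testBit i) h
  simp only [Nat.testBit_and, hi, Bool.true_and] at hcong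
  exact hcong

theorem ccXorLt {mask s : Nat} (hsub : s &&& mask = s) (hne : s ≠ 0) : mask ^^^ s < mask := by
  have himp := ccTestBitImpOfAndSelf hsub
  have hle : mask ^^^ s ≤ mask := by
    have hand : (mask ^^^ s) &&& mask = mask ^^^ s := by
      apply ccAndSelfOfTestBitImp
      intro i hi
      rw [Nat.testBit_xor] at hi
      cases hm : mask.testBit i with
      | true => rfl
      | false =>
        cases hs : s.testBit i with
        | false => rw [hm, hs] at hi; simp at hi
        | true => exact absurd (himp i hs) (by simp [hm])
    calc mask ^^^ s = (mask ^^^ s) &&& mask := hand.symm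
      _ ≤ mask := Nat.and_le_right
  have hne' : mask ^^^ s ≠ mask := by
    intro hEq
    apply hne
    have h2 : mask ^^^ (mask ^^^ s) = mask ^^^ mask := congrArg (mask ^^^ ·) hEq
    simpa [← Nat.xor_assoc] using h2
  omega

theorem ccAndXor {s mask : Nat} (h : s &&& mask = s) : s &&& (mask ^^^ s) = 0 := by
  have himp := ccTestBitImpOfAndSelf h
  apply Nat.eq_of_testBit_eq
  intro i
  simp only [Nat.testBit_and, Nat.testBit_xor, Nat.zero_testBit]
  cases hs : s.testBit i with
  | false => simp
  | true => simp [himp i hs]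

theorem ccOrXor {s mask : Nat} (h : s &&& mask = s) : s ||| (mask ^^^ s) = mask := by
  have himp := ccTestBitImpOfAndSelf h
  apply Nat.eq_of_testBit_eq
  intro i
  simp only [Nat.testBit_or, Nat.testBit_xor]
  cases hs : s.testBit i with
  | false => simp
  | true => simp [hs, himp i hs]

theorem ccDisjOfSub {t u s : Nat} (h1 : t &&& u = t) (h2 : s &&& u = 0) : s &&& t = 0 := by
  have h1' := ccTestBitImpOfAndSelf h1
  apply Nat.eq_of_testBit_eq
  intro i
  have h2' := congrArg (fun x => x.testBit i) h2
  simp only [Nat.testBit_and, Nat.zero_testBit] at h2' ⊢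
  cases ht : t.testBit i with
  | false => simp
  | true => simp only [h1' i ht, Bool.and_true] at h2'; simp [h2']

theorem ccXorOfOrDisj {s r : Nat} (h : s &&& r = 0) : (s ||| r) ^^^ s = r := by
  apply Nat.eq_of_testBit_eq
  intro i
  have h' := congrArg (fun x => x.testBit i) h
  simp only [Nat.testBit_and, Nat.zero_testBit] at h'
  simp only [Nat.testBit_xor, Nat.testBit_or]
  cases hs : s.testBit i <;> cases hr : r.testBit i <;> simp_all

theorem ccSubFoldrOr {s : Nat} {l : List Nat} (h : s ∈ l) :
    s &&& (l.foldr (· ||| ·) 0 : Nat) = s := by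
  apply ccAndSelfOfTestBitImp
  intro i hi
  induction l with
  | nil => cases h
  | cons t rest ih =>
    simp only [List.foldr_cons, Nat.testBit_or]
    rcases List.mem_cons.mp h with rfl | hmem
    · simp [hi]
    · simp [ih hmem]

theorem ccDisjFoldrOr {s : Nat} {l : List Nat} (h : ∀ t ∈ l, s &&& t = 0) :
    s &&& (l.foldr (· ||| ·) 0 : Nat) = 0 := by
  induction l with
  | nil => simp
  | cons t rest ih =>
    simp only [List.foldr_cons]
    have h1 : s &&& t = 0 := h t (by simp)
    have h2 : s &&& (rest.foldr (· ||| ·) 0 : Nat) = 0 := ih (fun u hu => h u (by simp [hu]))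
    apply Nat.eq_of_testBit_eq
    intro i
    have e1 := congrArg (fun x => x.testBit i) h1
    have e2 := congrArg (fun x => x.testBit i) h2
    simp only [Nat.testBit_and, Nat.zero_testBit, Nat.testBit_or] at e1 e2 ⊢
    cases hs : s.testBit i <;> simp_all

theorem ccTestBitFoldrOr (l : List Nat) (i : Nat) :
    (l.foldr (· ||| ·) 0 : Nat).testBit i = l.any (fun s => s.testBit i) := by
  induction l with
  | nil => simp
  | cons t rest ih => simp [Nat.testBit_or, ih]

-- ---- bounded popcount ----

def ccSize (N x : Nat) : Nat := (List.range N).countP (fun i => x.testBit i)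

theorem ccCountPDisj {α : Type} (l : List α) (p q : α → Bool)
    (h : ∀ a ∈ l, ¬(p a = true ∧ q a = true)) :
    l.countP (fun a => p a || q a) = l.countP p + l.countP q := by
  induction l with
  | nil => simp
  | cons a rest ih =>
    have hrest := ih (fun b hb => h b (by simp [hb]))
    have ha := h a (by simp)
    simp only [List.countP_cons, hrest]
    cases hp : p a <;> cases hq : q a <;> simp_all <;> omega

theorem ccSizeLor {a b : Nat} (N : Nat) (h : a &&& b = 0) :
    ccSize N (a ||| b) = ccSize N a + ccSize N b := by
  unfold ccSize
  have hcongr : (List.range N).countP (fun i => (a ||| b).testBit i)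
      = (List.range N).countP (fun i => a.testBit i || b.testBit i) := by
    apply List.countP_congr
    intro i _
    simp [Nat.testBit_or]
  rw [hcongr]
  apply ccCountPDisj
  intro i _
  intro ⟨ha, hb⟩
  have := congrArg (fun x => x.testBit i) h
  simp [Nat.testBit_and, Nat.zero_testBit, ha, hb] at this

theorem ccSizeZero (N : Nat) : ccSize N 0 = 0 := by
  unfold ccSize
  simp [List.countP_eq_zero]

theorem ccHighBitFalse {x N i : Nat} (hx : x < 2 ^ N) (hi : N ≤ i) : x.testBit i = false := by
  apply Nat.testBit_lt_two_pow
  calc x < 2 ^ N := hx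
    _ ≤ 2 ^ i := Nat.pow_le_pow_right (by norm_num) hi

theorem ccSizeCongr {x : Nat} {N M : Nat} (hN : x < 2 ^ N) (hM : x < 2 ^ M) :
    ccSize N x = ccSize M x := by
  -- both count the set bits below max N M
  have key : ∀ (A B : Nat), A ≤ B → x < 2 ^ A → ccSize B x = ccSize A x := by
    intro A B hAB hxA
    obtain ⟨j, rfl⟩ := Nat.exists_eq_add_of_le hAB
    induction j with
    | zero => rfl
    | succ j ih =>
      have : ccSize (A + (j + 1)) x = ccSize (A + j) x := by
        unfold ccSize
        have : A + (j + 1) = (A + j) + 1 := by omega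
        rw [this, List.range_succ, List.countP_append]
        simp [ccHighBitFalse hxA (show A ≤ A + j by omega)]
      omega
  rcases Nat.le_total N M with h | h
  · rw [key N M h hN]
  · rw [key M N h hM]

theorem ccPopcntFEq (fuel : Nat) : ∀ x : Nat, x < 2 ^ fuel → ccPopcntF fuel x = ccSize fuel x := by
  induction fuel with
  | zero =>
    intro x hx
    interval_cases x
    simp [ccPopcntF, ccSizeZero]
  | succ fuel ih =>
    intro x hx
    by_cases hx0 : x = 0
    · simp [hx0, ccPopcntF, ccSizeZero]
    · have hdiv : x / 2 < 2 ^ fuel := by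
        rw [Nat.two_pow_succ] at hx
        omega
      have hrec := ih (x / 2) hdiv
      have hsize : ccSize (fuel + 1) x = ccSize fuel (x / 2) + x % 2 := by
        unfold ccSize
        rw [List.range_succ_eq_map]
        simp only [List.countP_cons, List.countP_map]
        have h0 : (x.testBit 0) = decide (x % 2 = 1) := Nat.testBit_zero x
        have hshift : ((fun i => x.testBit i) ∘ Nat.succ) = (fun i => (x / 2).testBit i) := by
          funext i
          simp [Function.comp, Nat.testBit_succ]
        rw [hshift, h0]
        rcases Nat.mod_two_eq_zero_or_one x with h | h <;> simp [h] <;> omega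
      rw [ccPopcntF, if_neg hx0, hrec, hsize]

theorem ccPopcntEq {x N : Nat} (h : x < 2 ^ N) : ccPopcnt x = ccSize N x := by
  unfold ccPopcnt
  rw [ccPopcntFEq x x (Nat.lt_two_pow_self)]
  exact ccSizeCongr Nat.lt_two_pow_self h

-- ---- low_index characterization ----

theorem ccLowIdxFSpec (fuel : Nat) : ∀ x : Nat, x ≠ 0 → x < 2 ^ fuel →
    x.testBit (ccLowIdxF fuel x) = true ∧ ∀ j < ccLowIdxF fuel x, x.testBit j = false := by
  induction fuel with
  | zero => intro x hx hlt; interval_cases x; simp at hx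
  | succ fuel ih =>
    intro x hx hlt
    by_cases h1 : x &&& 1 = 1
    · have : x % 2 = 1 := by rwa [Nat.and_one_is_mod] at h1
      constructor
      · rw [ccLowIdxF, if_pos h1]
        simp [Nat.testBit_zero, this]
      · rw [ccLowIdxF, if_pos h1]; omega
    · have hmod : x % 2 = 0 := by
        rw [Nat.and_one_is_mod] at h1
        omega
      have hdiv0 : x / 2 ≠ 0 := by omega
      have hdivlt : x / 2 < 2 ^ fuel := by
        rw [Nat.two_pow_succ] at hlt
        omega
      obtain ⟨hb, hmin⟩ := ih (x / 2) hdiv0 hdivlt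
      rw [ccLowIdxF, if_neg h1]
      have hsr : x >>> 1 = x / 2 := Nat.shiftRight_one x
      rw [hsr]
      constructor
      · have : (1 : Nat) + ccLowIdxF fuel (x / 2) = (ccLowIdxF fuel (x / 2)) + 1 := by omega
        rw [this, Nat.testBit_succ]
        exact hb
      · intro j hj
        match j with
        | 0 => simp [Nat.testBit_zero, hmod]
        | j + 1 =>
          rw [Nat.testBit_succ]
          exact hmin j (by omega)

theorem ccLowIdxSpec {x : Nat} (hx : x ≠ 0) :
    x.testBit (ccLowIdx x) = true ∧ ∀ j < ccLowIdx x, x.testBit j = false :=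
  ccLowIdxFSpec x x hx Nat.lt_two_pow_self

theorem ccLowEq {s mask : Nat} (hs : s ≠ 0) (hsub : s &&& mask = s)
    (hbit : s.testBit (ccLowIdx mask) = true) : ccLowIdx s = ccLowIdx mask := by
  have hmask : mask ≠ 0 := by
    intro h
    subst h
    simp [Nat.and_zero] at hsub
    exact hs hsub.symm
  obtain ⟨hsb, hsmin⟩ := ccLowIdxSpec hs
  obtain ⟨hmb, hmmin⟩ := ccLowIdxSpec hmask
  have h1 : ccLowIdx s ≤ ccLowIdx mask := by
    by_contra h
    push_neg at h
    exact absurd hbit (by simp [hsmin _ h])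
  have h2 : ccLowIdx mask ≤ ccLowIdx s := by
    by_contra h
    push_neg at h
    have := ccTestBitImpOfAndSelf hsub _ hsb
    exact absurd this (by simp [hmmin _ h])
  omega

theorem ccSizePos {x N : Nat} (hx : x ≠ 0) (hN : x < 2 ^ N) : 0 < ccSize N x := by
  obtain ⟨hb, -⟩ := ccLowIdxSpec hx
  have hiN : ccLowIdx x < N := by
    by_contra h
    push_neg at h
    rw [ccHighBitFalse hN h] at hb
    cases hb
  unfold ccSize
  rw [List.countP_eq_length_filter]
  exact List.length_pos_of_mem (List.mem_filter.mpr ⟨List.mem_range.mpr hiN, hb⟩)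

-- x < 2^N as soon as all set bits are below N
theorem ccLtPow {N : Nat} : ∀ {x : Nat}, (∀ i, x.testBit i = true → i < N) → x < 2 ^ N := by
  induction N with
  | zero =>
    intro x h
    by_cases hx : x = 0
    · subst hx; simp
    · obtain ⟨hb, -⟩ := ccLowIdxSpec hx
      exact absurd (h _ hb) (by omega)
  | succ M ih =>
    intro x h
    have hhalf : x / 2 < 2 ^ M := by
      apply ih
      intro i hi
      have hsucc : x.testBit (i + 1) = true := by rwa [Nat.testBit_succ]
      have := h _ hsucc
      omega
    rw [Nat.two_pow_succ]
    omega

-- ---- ccOptMin folds ----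

theorem ccOptMinNoneRight (a : Option Int) : ccOptMin a none = a := by
  cases a <;> rfl

theorem ccFoldIf {α : Type} (L : List α) (p : α → Prop) [DecidablePred p]
    (v : α → Option Int) (r : Option Int) :
    L.foldl (fun res s => if p s then ccOptMin res (v s) else res) r
      = L.foldl (fun res s => ccOptMin res (if p s then v s else none)) r := by
  induction L generalizing r with
  | nil => rfl
  | cons s rest ih =>
    simp only [List.foldl_cons]
    by_cases h : p s
    · simp [h, ih]
    · simp [h, ccOptMinNoneRight, ih]

theorem ccFMSome {g : Nat → Option Int} {L : List Nat} :
    ∀ {r : Option Int} {w : Int}, L.foldl (fun res s => ccOptMin res (g s)) r = some w →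
      r = some w ∨ ∃ s ∈ L, g s = some w := by
  induction L with
  | nil => intro r w h; exact Or.inl h
  | cons s rest ih =>
    intro r w h
    simp only [List.foldl_cons] at h
    rcases ih h with hr | ⟨t, ht, hgt⟩
    · cases hrr : r with
      | none =>
        rw [hrr] at hr
        cases hgs : g s <;> rw [hgs] at hr <;> simp only [ccOptMin] at hr
        · exact absurd hr (by simp)
        · exact Or.inr ⟨s, by simp, by rw [hgs, hr]⟩
      | some x =>
        rw [hrr] at hr
        cases hgs : g s with
        | none => rw [hgs] at hr; simp only [ccOptMin] at hr; exact Or.inl hr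
        | some y =>
          rw [hgs] at hr
          simp only [ccOptMin, Option.some.injEq] at hr
          rcases le_total x y with hxy | hxy
          · exact Or.inl (by rw [min_eq_left hxy] at hr; rw [hr])
          · exact Or.inr ⟨s, by simp, by rw [hgs]; rw [min_eq_right hxy] at hr; rw [hr]⟩
    · exact Or.inr ⟨t, by simp [ht], hgt⟩

theorem ccFMLe {g : Nat → Option Int} {L : List Nat} :
    ∀ {r : Option Int} {w : Int}, (r = some w ∨ ∃ s ∈ L, g s = some w) →
      ∃ v, L.foldl (fun res s => ccOptMin res (g s)) r = some v ∧ v ≤ w := by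
  induction L with
  | nil =>
    intro r w h
    rcases h with h | ⟨s, hs, -⟩
    · exact ⟨w, h, le_refl w⟩
    · cases hs
  | cons s rest ih =>
    intro r w h
    simp only [List.foldl_cons]
    rcases h with hr | ⟨t, ht, hgt⟩
    · subst hr
      -- head state some w; ccOptMin (some w) (g s) = some (≤ w)
      cases hgs : g s
      · exact ih (Or.inl (by simp [ccOptMin]))
      · rename_i y
        obtain ⟨v, hv, hle⟩ := ih (r := some (min w y)) (w := min w y) (Or.inl rfl)
        exact ⟨v, by simpa [ccOptMin] using hv, le_trans hle (min_le_left _ _)⟩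
    · rcases List.mem_cons.mp ht with rfl | hmem
      · -- g t = some w hit at the head
        cases hrr : r
        · obtain ⟨v, hv, hle⟩ := ih (r := g t) (w := w) (Or.inl hgt)
          exact ⟨v, by simpa [ccOptMin, hgt] using hv, hle⟩
        · rename_i x
          rw [hgt]
          obtain ⟨v, hv, hle⟩ := ih (r := some (min x w)) (w := min x w) (Or.inl rfl)
          exact ⟨v, by simpa [ccOptMin] using hv, le_trans hle (min_le_right _ _)⟩
      · exact ih (Or.inr ⟨t, hmem, hgt⟩)


-- ---- the canonical block dictionary both builds compute ----

def ccOrMask (c : List Nat) : Nat := c.foldl (fun mk i => mk ||| (1 <<< i)) 0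

def ccSetFold (nums : List Int) (c : List Nat) : PySem.Set Int :=
  c.foldl (fun s i => PySem.Set.add s (ccNth nums i)) PySem.Set.empty

def ccValOf (nums : List Int) (mask : Nat) : Int :=
  (PySem.List.max? (ccValsB nums mask) (fun v => v)).getD 0
    - (PySem.List.min? (ccValsB nums mask) (fun v => v)).getD 0

def ccCanon (nums : List Int) (m : Nat) (mask : Nat) : Option Int :=
  if 0 < mask ∧ mask < 2 ^ nums.length ∧ ccSize nums.length mask = m
      ∧ (ccValsB nums mask).length = m
  then some (ccValOf nums mask) else none

theorem ccCanonNeIff (nums : List Int) (m mask : Nat) :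
    ccCanon nums m mask ≠ none ↔
      (0 < mask ∧ mask < 2 ^ nums.length ∧ ccSize nums.length mask = m
        ∧ (ccValsB nums mask).length = m) := by
  unfold ccCanon
  split <;> simp_all

-- ---- partitions into canonical blocks ----

def ccCost (nums : List Int) (m : Nat) (s : Nat) : Int := (ccCanon nums m s).getD 0

def ccSum (nums : List Int) (m : Nat) (l : List Nat) : Int := (l.map (ccCost nums m)).sum

def ccPart (nums : List Int) (m : Nat) (l : List Nat) (mask : Nat) : Prop :=
  (∀ s ∈ l, ccCanon nums m s ≠ none) ∧ l.Pairwise (fun a b => a &&& b = 0)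
    ∧ l.foldr (· ||| ·) 0 = mask

theorem ccPartZeroNil {nums : List Int} {m : Nat} {l : List Nat}
    (hp : ccPart nums m l 0) : l = [] := by
  cases l with
  | nil => rfl
  | cons s rest =>
    exfalso
    have hne := hp.1 s (by simp)
    have hpos := ((ccCanonNeIff nums m s).mp hne).1
    have hsub := ccSubFoldrOr (l := s :: rest) (s := s) (by simp)
    rw [hp.2.2] at hsub
    simp [Nat.and_zero] at hsub
    omega

theorem ccSizeFoldr (N : Nat) (l : List Nat) (hpw : l.Pairwise (fun a b => a &&& b = 0)) :
    ccSize N (l.foldr (· ||| ·) 0) = (l.map (ccSize N)).sum := by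
  induction l with
  | nil => simp [ccSizeZero]
  | cons s rest ih =>
    rcases List.pairwise_cons.mp hpw with ⟨hdisj, hrest⟩
    simp only [List.foldr_cons, List.map_cons, List.sum_cons]
    rw [ccSizeLor N (ccDisjFoldrOr hdisj), ih hrest]

theorem ccSingleton {nums : List Int} {m mask : Nat} {l : List Nat} (hm : 1 ≤ m)
    (hmask : ccCanon nums m mask ≠ none) (hp : ccPart nums m l mask) : l = [mask] := by
  obtain ⟨-, -, hsz, -⟩ := (ccCanonNeIff nums m mask).mp hmask
  have hsizes : ∀ s ∈ l, ccSize nums.length s = m := fun s hs =>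
    ((ccCanonNeIff nums m s).mp (hp.1 s hs)).2.2.1
  have hfold := ccSizeFoldr nums.length l hp.2.1
  rw [hp.2.2, hsz] at hfold
  have hmap : l.map (ccSize nums.length) = l.map (fun _ => m) :=
    List.map_congr_left hsizes
  rw [hmap] at hfold
  have hconst : (l.map (fun _ => m)).sum = l.length * m := by
    rw [List.map_const']
    simp [List.sum_replicate, smul_eq_mul]
  rw [hconst] at hfold
  have hlen1 : l.length = 1 :=
    Nat.eq_of_mul_eq_mul_right (show 0 < m by omega) (by rw [one_mul]; exact hfold.symm)
  obtain ⟨a, rfl⟩ := List.length_eq_one_iff.mp hlen1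
  have : a ||| 0 = mask := hp.2.2
  simp at this
  rw [this]

-- ---- a conditional-insert loop computes its canonical function ----

theorem ccFoldChar {α : Type} (κ : α → Nat) (cond : α → Prop) [DecidablePred cond]
    (val : α → Int) (F : Nat → Option Int) :
    ∀ (L : List α) (d₀ : PySem.Dict Nat Int),
    (∀ c ∈ L, (cond c ↔ F (κ c) ≠ none) ∧ (cond c → F (κ c) = some (val c))) →
    ∀ mask, (L.foldl (fun d c => if cond c then d.insert (κ c) (val c) else d) d₀).get? mask
      = if ∃ c ∈ L, κ c = mask ∧ cond c then F mask else d₀.get? mask := by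
  intro L
  induction L with
  | nil => intro d₀ h mask; simp
  | cons c rest ih =>
    intro d₀ h mask
    simp only [List.foldl_cons]
    rw [ih _ (fun c' hc' => h c' (by simp [hc']))]
    by_cases hex : ∃ c' ∈ rest, κ c' = mask ∧ cond c'
    · rw [if_pos hex, if_pos (by rcases hex with ⟨c', h1, h2, h3⟩; exact ⟨c', by simp [h1], h2, h3⟩)]
    · rw [if_neg hex]
      by_cases hc : cond c
      · by_cases hk : κ c = mask
        · rw [if_pos hc, if_pos ⟨c, by simp, hk, hc⟩]
          rw [PySem.Dict.get?_insert, if_pos hk.symm]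
          have hv := (h c (by simp)).2 hc
          rw [hk] at hv
          exact hv.symm
        · rw [if_pos hc]
          rw [if_neg (by
            rintro ⟨c', hc', h2, h3⟩
            rcases List.mem_cons.mp hc' with rfl | hmem
            · exact hk h2
            · exact hex ⟨c', hmem, h2, h3⟩)]
          rw [PySem.Dict.get?_insert, if_neg (fun h' => hk h'.symm)]
      · rw [if_neg hc]
        rw [if_neg (by
          rintro ⟨c', hc', h2, h3⟩
          rcases List.mem_cons.mp hc' with rfl | hmem
          · exact hc h3
          · exact hex ⟨c', hmem, h2, h3⟩)]

-- ---- combinations produce exactly the length-m sublists ----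

theorem ccMemCombos : ∀ (r : Nat) (l c : List Nat), c ∈ ccCombos r l ↔ c.Sublist l ∧ c.length = r := by
  intro r l
  induction l generalizing r with
  | nil =>
    intro c
    cases r with
    | zero =>
      simp only [ccCombos, List.mem_singleton]
      constructor
      · rintro rfl; simp
      · rintro ⟨hs, hl⟩; exact List.length_eq_zero_iff.mp hl
    | succ r =>
      simp only [ccCombos]
      constructor
      · intro h; cases h
      · rintro ⟨hs, hl⟩
        rw [List.sublist_nil.mp hs] at hl
        cases hl
  | cons x xs ih =>
    intro c
    cases r with
    | zero =>
      simp only [ccCombos, List.mem_singleton]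
      constructor
      · rintro rfl; simp
      · rintro ⟨hs, hl⟩; exact List.length_eq_zero_iff.mp hl
    | succ r =>
      simp only [ccCombos, List.mem_append, List.mem_map]
      constructor
      · rintro (⟨c', hc', rfl⟩ | h)
        · obtain ⟨hs, hl⟩ := (ih r c').mp hc'
          exact ⟨hs.cons₂ x, by simp [hl]⟩
        · obtain ⟨hs, hl⟩ := (ih (r + 1) c).mp h
          exact ⟨hs.cons x, hl⟩
      · rintro ⟨hs, hl⟩
        rcases List.sublist_cons_iff.mp hs with h | ⟨c', rfl, hc'⟩
        · exact Or.inr ((ih (r + 1) c).mpr ⟨h, hl⟩)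
        · exact Or.inl ⟨c', (ih r c').mpr ⟨hc', by simpa using hl⟩, rfl⟩

theorem ccFilterSub : ∀ {c l : List Nat}, c.Sublist l → l.Nodup →
    l.filter (fun a => decide (a ∈ c)) = c := by
  intro c l h
  induction h with
  | slnil => simp
  | @cons c l a h ih =>
    intro hnod
    rcases List.nodup_cons.mp hnod with ⟨ha, hnod'⟩
    have hac : a ∉ c := fun hmem => ha (h.subset hmem)
    simp only [List.filter_cons, decide_eq_true_eq]
    rw [if_neg hac]
    exact ih hnod'
  | @cons₂ c l a h ih =>
    intro hnod
    rcases List.nodup_cons.mp hnod with ⟨ha, hnod'⟩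
    simp only [List.filter_cons, decide_eq_true_eq]
    rw [if_pos (by simp)]
    congr 1
    have : l.filter (fun b => decide (b ∈ a :: c)) = l.filter (fun b => decide (b ∈ c)) := by
      apply List.filter_congr
      intro b hb
      have hba : b ≠ a := fun hEq => ha (hEq ▸ hb)
      simp [List.mem_cons, hba]
    rw [this]
    exact ih hnod'

theorem ccOrMaskAux : ∀ (c : List Nat) (acc i : Nat),
    (c.foldl (fun mk j => mk ||| (1 <<< j)) acc).testBit i = (acc.testBit i || decide (i ∈ c)) := by
  intro c
  induction c with
  | nil => intro acc i; simp
  | cons j rest ih =>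
    intro acc i
    simp only [List.foldl_cons]
    rw [ih]
    simp only [Nat.testBit_or, Nat.shiftLeft_eq, one_mul, Nat.testBit_two_pow, List.mem_cons]
    by_cases hij : i = j
    · simp [hij]
    · have hji : ¬ j = i := fun h => hij h.symm
      simp [hij, hji, Bool.or_assoc]

theorem ccOrMaskBit (c : List Nat) (i : Nat) : (ccOrMask c).testBit i = decide (i ∈ c) := by
  unfold ccOrMask
  rw [ccOrMaskAux]
  simp [Nat.zero_testBit]

theorem ccPairFoldSplit {α β γ : Type} (f : β → α → β) (g : γ → α → γ) :
    ∀ (c : List α) (a : β) (b : γ),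
      (c.foldl (fun p i => (f p.1 i, g p.2 i)) (a, b)) = (c.foldl f a, c.foldl g b) := by
  intro c
  induction c with
  | nil => intro a b; rfl
  | cons x xs ih => intro a b; simp only [List.foldl_cons]; exact ih (f a x) (g b x)

theorem ccFoldFilter {α β : Type} (p : α → Prop) [DecidablePred p] (g : β → α → β) :
    ∀ (L : List α) (a : β),
      L.foldl (fun s i => if p i then g s i else s) a
        = (L.filter (fun i => decide (p i))).foldl g a := by
  intro L
  induction L with
  | nil => intro a; rfl
  | cons x xs ih =>
    intro a
    simp only [List.foldl_cons, List.filter_cons]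
    by_cases h : p x <;> simp [h, ih]

theorem ccTBiff (mask i : Nat) : ((mask >>> i) &&& 1 = 1) ↔ mask.testBit i = true := by
  have h1 : (mask >>> i).testBit 0 = mask.testBit i := by
    simp [Nat.testBit_shiftRight]
  rw [← h1, Nat.testBit_zero, Nat.and_one_is_mod]
  simp only [decide_eq_true_eq]

theorem ccValsBFilter (nums : List Int) (mask : Nat) :
    ccValsB nums mask
      = ((List.range nums.length).filter (fun i => mask.testBit i)).foldl
          (fun s i => PySem.Set.add s (ccNth nums i)) PySem.Set.empty := by
  unfold ccValsB
  rw [ccFoldFilter (p := fun i => (mask >>> i) &&& 1 = 1)]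
  congr 1
  apply List.filter_congr
  intro i _
  by_cases h : mask.testBit i = true
  · simp [h, (ccTBiff mask i).mpr h]
  · have : ¬ ((mask >>> i) &&& 1 = 1) := fun hc => h ((ccTBiff mask i).mp hc)
    simp at h
    simp [h, this]

-- the pair accumulated while scanning a combination, projected
def ccPF (nums : List Int) (c : List Nat) : Nat × PySem.Set Int :=
  c.foldl (fun p i => (p.1 ||| (1 <<< i), PySem.Set.add p.2 (ccNth nums i)))
    (0, (PySem.Set.empty : PySem.Set Int))

theorem ccPFSplit (nums : List Int) (c : List Nat) :
    ccPF nums c = (ccOrMask c, ccSetFold nums c) := by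
  unfold ccPF ccOrMask ccSetFold
  exact ccPairFoldSplit (fun mk i => mk ||| 1 <<< i) (fun s i => s.add (ccNth nums i)) c 0 PySem.Set.empty

theorem ccBuildAEq (nums : List Int) (m : Nat) (L : List (List Nat)) :
    ccBuildA nums m L
      = L.foldl (fun d c => if (ccPF nums c).2.length = m then
          d.insert (ccPF nums c).1
            ((PySem.List.max? (ccPF nums c).2 (fun v => v)).getD 0
              - (PySem.List.min? (ccPF nums c).2 (fun v => v)).getD 0)
          else d) PySem.Dict.empty := rfl

theorem ccComboFacts (nums : List Int) {m : Nat} (hm : 1 ≤ m) {c : List Nat}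
    (hsub : c.Sublist (List.range nums.length)) (hlen : c.length = m) :
    0 < ccOrMask c ∧ ccOrMask c < 2 ^ nums.length
      ∧ ccSize nums.length (ccOrMask c) = m
      ∧ ccValsB nums (ccOrMask c) = ccSetFold nums c := by
  have hbit := ccOrMaskBit c
  have hmem : ∀ i ∈ c, i < nums.length := fun i hi => List.mem_range.mp (hsub.subset hi)
  have hlt : ccOrMask c < 2 ^ nums.length := by
    apply ccLtPow
    intro i hb
    rw [hbit i] at hb
    exact hmem i (by simpa using hb)
  have hfil : (List.range nums.length).filter (fun i => (ccOrMask c).testBit i) = c := by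
    have hcongr : (List.range nums.length).filter (fun i => (ccOrMask c).testBit i)
        = (List.range nums.length).filter (fun a => decide (a ∈ c)) := by
      apply List.filter_congr
      intro i _
      rw [hbit i]
    rw [hcongr]
    exact ccFilterSub hsub (List.nodup_range)
  have hsz : ccSize nums.length (ccOrMask c) = m := by
    unfold ccSize
    rw [List.countP_eq_length_filter, hfil, hlen]
  have hpos : 0 < ccOrMask c := by
    have hcne : c ≠ [] := by
      intro h
      rw [h] at hlen
      simp at hlen
      omega
    obtain ⟨i, hi⟩ := List.exists_mem_of_ne_nil c hcne
    have hib : (ccOrMask c).testBit i = true := by simp [hbit i, hi]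
    rcases Nat.eq_zero_or_pos (ccOrMask c) with h0 | h
    · rw [h0, Nat.zero_testBit] at hib; cases hib
    · exact h
  have hvals : ccValsB nums (ccOrMask c) = ccSetFold nums c := by
    rw [ccValsBFilter, hfil]
    rfl
  exact ⟨hpos, hlt, hsz, hvals⟩

theorem ccBuildAChar (nums : List Int) {m : Nat} (hm : 1 ≤ m) (mask : Nat) :
    (ccBuildA nums m (ccCombos m (List.range nums.length))).get? mask = ccCanon nums m mask := by
  rw [ccBuildAEq]
  rw [ccFoldChar (fun c => (ccPF nums c).1) (fun c => (ccPF nums c).2.length = m)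
    (fun c => (PySem.List.max? (ccPF nums c).2 (fun v => v)).getD 0
      - (PySem.List.min? (ccPF nums c).2 (fun v => v)).getD 0)
    (ccCanon nums m) _ _ ?good mask]
  case good =>
    intro c hc
    obtain ⟨hsub, hlen⟩ := (ccMemCombos m (List.range nums.length) c).mp hc
    obtain ⟨hpos, hlt, hsz, hvals⟩ := ccComboFacts nums hm hsub hlen
    simp only [ccPFSplit]
    constructor
    · rw [ccCanonNeIff]
      constructor
      · intro hcnd
        exact ⟨hpos, hlt, hsz, by rw [hvals]; exact hcnd⟩
      · rintro ⟨-, -, -, h4⟩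
        rw [← hvals]
        exact h4
    · intro hcnd
      unfold ccCanon
      rw [if_pos ⟨hpos, hlt, hsz, by rw [hvals]; exact hcnd⟩]
      unfold ccValOf
      rw [hvals]
  by_cases hex : ∃ c ∈ ccCombos m (List.range nums.length), (ccPF nums c).1 = mask ∧ (ccPF nums c).2.length = m
  · rw [if_pos hex]
  · rw [if_neg hex, PySem.Dict.get?_empty]
    by_contra hne
    have hne' : ccCanon nums m mask ≠ none := fun h => hne h.symm
    obtain ⟨hpos, hlt, hsz, hvl⟩ := (ccCanonNeIff nums m mask).mp hne'
    set c₀ := (List.range nums.length).filter (fun i => mask.testBit i) with hc₀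
    have hsub : c₀.Sublist (List.range nums.length) := List.filter_sublist
    have hlen : c₀.length = m := by
      rw [hc₀, ← List.countP_eq_length_filter]
      exact hsz
    have hcmem : c₀ ∈ ccCombos m (List.range nums.length) :=
      (ccMemCombos m (List.range nums.length) c₀).mpr ⟨hsub, hlen⟩
    have hmask : ccOrMask c₀ = mask := by
      apply Nat.eq_of_testBit_eq
      intro i
      rw [ccOrMaskBit]
      by_cases hi : i < nums.length
      · by_cases hb : mask.testBit i = true
        · simp [hc₀, List.mem_filter, List.mem_range, hi, hb]
        · simp at hb
          simp [hc₀, List.mem_filter, hb]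
      · push_neg at hi
        rw [ccHighBitFalse hlt hi]
        simp [hc₀, List.mem_filter, List.mem_range]
        omega
    have hm1 : 1 ≤ m := by
      rcases Nat.eq_zero_or_pos m with h0 | h
      · rw [h0] at hsz
        have := ccSizePos (Nat.pos_iff_ne_zero.mp hpos) hlt
        omega
      · exact h
    obtain ⟨-, -, -, hvals⟩ := ccComboFacts nums hm1 hsub hlen
    apply hex
    refine ⟨c₀, hcmem, ?_, ?_⟩
    · simp only [ccPFSplit]; exact hmask
    · simp only [ccPFSplit]
      rw [← hvals, hmask]
      exact hvl

theorem ccBuildBEq (nums : List Int) (m : Nat) :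
    ccBuildB nums m
      = (List.range' 1 (2 ^ nums.length - 1)).foldl (fun d mask =>
          if (ccPopcnt mask = m ∧ (ccValsB nums mask).length = m) then
            d.insert mask ((PySem.List.max? (ccValsB nums mask) (fun v => v)).getD 0
              - (PySem.List.min? (ccValsB nums mask) (fun v => v)).getD 0)
          else d) PySem.Dict.empty := by
  unfold ccBuildB
  congr 1
  funext d mask
  by_cases h1 : ccPopcnt mask = m <;> by_cases h2 : (ccValsB nums mask).length = m <;>
    simp [h1, h2]

theorem ccBuildBChar (nums : List Int) (m mask : Nat) :
    (ccBuildB nums m).get? mask = ccCanon nums m mask := by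
  rw [ccBuildBEq]
  rw [ccFoldChar (fun c => c) (fun c => ccPopcnt c = m ∧ (ccValsB nums c).length = m)
    (fun c => (PySem.List.max? (ccValsB nums c) (fun v => v)).getD 0
      - (PySem.List.min? (ccValsB nums c) (fun v => v)).getD 0)
    (ccCanon nums m) _ _ ?good mask]
  case good =>
    intro c hc
    rw [List.mem_range'_1] at hc
    have hpos : 0 < c := hc.1
    have hlt : c < 2 ^ nums.length := by
      have h2 : 1 ≤ 2 ^ nums.length := Nat.one_le_two_pow
      omega
    have hpc : ccPopcnt c = ccSize nums.length c := ccPopcntEq hlt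
    constructor
    · rw [ccCanonNeIff]
      constructor
      · rintro ⟨h1, h2⟩
        exact ⟨hpos, hlt, by rw [← hpc]; exact h1, h2⟩
      · rintro ⟨-, -, h3, h4⟩
        exact ⟨by rw [hpc]; exact h3, h4⟩
    · rintro ⟨h1, h2⟩
      unfold ccCanon
      rw [if_pos ⟨hpos, hlt, by rw [← hpc]; exact h1, h2⟩]
      rfl
  by_cases hex : ∃ c ∈ List.range' 1 (2 ^ nums.length - 1), c = mask ∧ (ccPopcnt c = m ∧ (ccValsB nums c).length = m)
  · rw [if_pos hex]
  · rw [if_neg hex, PySem.Dict.get?_empty]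
    by_contra hne
    have hne' : ccCanon nums m mask ≠ none := fun h => hne h.symm
    obtain ⟨hpos, hlt, hsz, hvl⟩ := (ccCanonNeIff nums m mask).mp hne'
    apply hex
    refine ⟨mask, List.mem_range'_1.mpr ⟨hpos, ?_⟩, rfl, ?_, hvl⟩
    · have h2 : 1 ≤ 2 ^ nums.length := Nat.one_le_two_pow
      omega
    · rw [ccPopcntEq hlt]
      exact hsz

-- ---- the by_low grouping ----

theorem ccGroupAux (b : Nat) : ∀ (L : List Nat) (bl : PySem.Dict Nat (List Nat)),
    (L.foldl (fun bl key => bl.modify (ccLowIdx key) [] (fun ls => ls ++ [key])) bl).getD b []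
      = bl.getD b [] ++ L.filter (fun key => decide (ccLowIdx key = b)) := by
  intro L
  induction L with
  | nil => intro bl; simp
  | cons key rest ih =>
    intro bl
    simp only [List.foldl_cons, List.filter_cons]
    rw [ih]
    rw [PySem.Dict.getD_modify]
    by_cases hb : ccLowIdx key = b
    · rw [if_pos hb.symm]
      simp [hb, List.append_assoc]
    · rw [if_neg (fun h => hb h.symm)]
      simp [hb]

theorem ccByLowMem (d : PySem.Dict Nat Int) (key b : Nat) :
    key ∈ (ccByLow d).getD b [] ↔ key ∈ d.keys ∧ ccLowIdx key = b := by
  unfold ccByLow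
  rw [ccGroupAux]
  simp [PySem.Dict.getD_empty, List.mem_filter]


-- ---- A's dfs against partitions ----

theorem ccASound (nums : List Int) (m : Nat) (d : PySem.Dict Nat Int)
    (hd : ∀ s, d.get? s = ccCanon nums m s) :
    ∀ fuel : Nat, ∀ {mask : Nat} {v : Int}, mask < fuel → ccDfsF fuel d mask = some v →
      ∃ l, ccPart nums m l mask ∧ ccSum nums m l = v := by
  intro fuel
  induction fuel with
  | zero => intro mask v h; omega
  | succ fuel ih =>
    intro mask v hlt hrun
    rw [ccDfsF] at hrun
    cases hg : d.get? mask with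
    | some w =>
      rw [hg] at hrun
      simp only [Option.some.injEq] at hrun
      refine ⟨[mask], ⟨?_, ?_, ?_⟩, ?_⟩
      · intro s hs
        simp only [List.mem_singleton] at hs
        subst hs
        rw [← hd, hg]
        simp
      · simp
      · simp
      · unfold ccSum ccCost
        simp only [List.map_cons, List.map_nil, List.sum_cons, List.sum_nil, add_zero]
        rw [← hd, hg]
        simpa using hrun
    | none =>
      rw [hg] at hrun
      rw [ccFoldIf] at hrun
      rcases ccFMSome hrun with hnone | ⟨s, hs, hgs⟩
      · cases hnone
      · by_cases hc : s &&& mask = s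
        swap
        · rw [if_neg hc] at hgs; cases hgs
        rw [if_pos hc] at hgs
        obtain ⟨w, hw, hv⟩ := Option.map_eq_some_iff.mp hgs
        have hcanon_s : ccCanon nums m s ≠ none := by
          rw [← hd]
          intro h
          exact ((PySem.Dict.get?_eq_none_iff_not_mem_keys d s).mp h) hs
        have hspos : 0 < s := ((ccCanonNeIff nums m s).mp hcanon_s).1
        have hxlt : mask ^^^ s < mask := ccXorLt hc (by omega)
        obtain ⟨l', hp', hsum'⟩ := ih (by omega) hw
        refine ⟨s :: l', ⟨?_, ?_, ?_⟩, ?_⟩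
        · intro t ht
          rcases List.mem_cons.mp ht with rfl | hmem
          · exact hcanon_s
          · exact hp'.1 t hmem
        · rw [List.pairwise_cons]
          refine ⟨?_, hp'.2.1⟩
          intro t ht
          have htsub : t &&& (mask ^^^ s) = t := by
            rw [← hp'.2.2]
            exact ccSubFoldrOr ht
          exact ccDisjOfSub htsub (ccAndXor hc)
        · simp only [List.foldr_cons]
          rw [hp'.2.2]
          exact ccOrXor hc
        · unfold ccSum at hsum' ⊢
          simp only [List.map_cons, List.sum_cons]
          rw [hsum', ← hv]
          congr 1
          unfold ccCost
          rw [← hd, PySem.Dict.getD_eq_get?_getD]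

theorem ccAComplete (nums : List Int) (m : Nat) (d : PySem.Dict Nat Int)
    (hd : ∀ s, d.get? s = ccCanon nums m s) (hm : 1 ≤ m) :
    ∀ fuel : Nat, ∀ {mask : Nat} {l : List Nat}, mask < fuel → ccPart nums m l mask → l ≠ [] →
      ∃ w, ccDfsF fuel d mask = some w ∧ w ≤ ccSum nums m l := by
  intro fuel
  induction fuel with
  | zero => intro mask l h; omega
  | succ fuel ih =>
    intro mask l hlt hp hlne
    rw [ccDfsF]
    cases hg : d.get? mask with
    | some w =>
      have hcanon : ccCanon nums m mask ≠ none := by rw [← hd]; simp [hg]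
      have hl := ccSingleton hm hcanon hp
      refine ⟨w, rfl, ?_⟩
      rw [hl]
      unfold ccSum ccCost
      simp only [List.map_cons, List.map_nil, List.sum_cons, List.sum_nil, add_zero]
      rw [← hd, hg]
      simp
    | none =>
      cases l with
      | nil => exact absurd rfl hlne
      | cons s rest =>
        have hcanon_mask : ccCanon nums m mask = none := by rw [← hd]; exact hg
        have hs_canon : ccCanon nums m s ≠ none := hp.1 s (by simp)
        have hrest_ne : rest ≠ [] := by
          rintro rfl
          have hfold : s ||| 0 = mask := hp.2.2
          simp at hfold
          rw [← hfold] at hcanon_mask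
          exact hs_canon hcanon_mask
        have hssub : s &&& mask = s := by
          rw [← hp.2.2]
          exact ccSubFoldrOr (by simp)
        have hdisj : s &&& (rest.foldr (· ||| ·) 0 : Nat) = 0 :=
          ccDisjFoldrOr (List.pairwise_cons.mp hp.2.1).1
        have hfold_rest : (rest.foldr (· ||| ·) 0 : Nat) = mask ^^^ s := by
          have hfold : s ||| (rest.foldr (· ||| ·) 0 : Nat) = mask := hp.2.2
          rw [← hfold]
          exact (ccXorOfOrDisj hdisj).symm
        have hprest : ccPart nums m rest (mask ^^^ s) :=
          ⟨fun t ht => hp.1 t (by simp [ht]), (List.pairwise_cons.mp hp.2.1).2, hfold_rest⟩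
        have hspos : 0 < s := ((ccCanonNeIff nums m s).mp hs_canon).1
        have hxlt : mask ^^^ s < mask := ccXorLt hssub (by omega)
        obtain ⟨w', hw', hle'⟩ := ih (by omega) hprest hrest_ne
        rw [ccFoldIf]
        have hmem_keys : s ∈ d.keys := by
          by_contra hnk
          exact hs_canon (by rw [← hd]; exact (PySem.Dict.get?_eq_none_iff_not_mem_keys d s).mpr hnk)
        have hgs_val : (if s &&& mask = s then
            (ccDfsF fuel d (mask ^^^ s)).map (fun w => d.getD s 0 + w) else none)
            = some (d.getD s 0 + w') := by
          rw [if_pos hssub, hw']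
          rfl
        obtain ⟨v, hv, hvle⟩ := ccFMLe
          (g := fun t => if t &&& mask = t then
            (ccDfsF fuel d (mask ^^^ t)).map (fun w => d.getD t 0 + w) else none)
          (Or.inr ⟨s, hmem_keys, hgs_val⟩)
        refine ⟨v, hv, ?_⟩
        have hcost : ccCost nums m s = d.getD s 0 := by
          unfold ccCost
          rw [← hd, PySem.Dict.getD_eq_get?_getD]
        calc v ≤ d.getD s 0 + w' := hvle
          _ ≤ d.getD s 0 + ccSum nums m rest := by omega
          _ = ccSum nums m (s :: rest) := by
              unfold ccSum
              simp only [List.map_cons, List.sum_cons]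
              rw [hcost]

-- ---- B's best against partitions ----

theorem ccBSound (nums : List Int) (m : Nat) (d : PySem.Dict Nat Int)
    (hd : ∀ s, d.get? s = ccCanon nums m s) :
    ∀ fuel : Nat, ∀ {mask : Nat} {v : Int}, mask < fuel →
      ccBestF fuel d (ccByLow d) mask = some v →
      ∃ l, ccPart nums m l mask ∧ ccSum nums m l = v := by
  intro fuel
  induction fuel with
  | zero => intro mask v h; omega
  | succ fuel ih =>
    intro mask v hlt hrun
    rw [ccBestF] at hrun
    by_cases hmask0 : mask = 0
    · rw [if_pos hmask0] at hrun
      simp only [Option.some.injEq] at hrun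
      subst hmask0
      exact ⟨[], ⟨by simp, by simp, by simp⟩, by simp [ccSum, ← hrun]⟩
    · rw [if_neg hmask0] at hrun
      rw [ccFoldIf] at hrun
      rcases ccFMSome hrun with hnone | ⟨s, hs, hgs⟩
      · cases hnone
      · by_cases hc : s &&& mask = s
        swap
        · rw [if_neg hc] at hgs; cases hgs
        rw [if_pos hc] at hgs
        obtain ⟨w, hw, hv⟩ := Option.map_eq_some_iff.mp hgs
        have hkeys : s ∈ d.keys := ((ccByLowMem d s (ccLowIdx mask)).mp hs).1
        have hcanon_s : ccCanon nums m s ≠ none := by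
          rw [← hd]
          intro h
          exact ((PySem.Dict.get?_eq_none_iff_not_mem_keys d s).mp h) hkeys
        have hspos : 0 < s := ((ccCanonNeIff nums m s).mp hcanon_s).1
        have hxlt : mask ^^^ s < mask := ccXorLt hc (by omega)
        obtain ⟨l', hp', hsum'⟩ := ih (by omega) hw
        refine ⟨s :: l', ⟨?_, ?_, ?_⟩, ?_⟩
        · intro t ht
          rcases List.mem_cons.mp ht with rfl | hmem
          · exact hcanon_s
          · exact hp'.1 t hmem
        · rw [List.pairwise_cons]
          refine ⟨?_, hp'.2.1⟩
          intro t ht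
          have htsub : t &&& (mask ^^^ s) = t := by
            rw [← hp'.2.2]
            exact ccSubFoldrOr ht
          exact ccDisjOfSub htsub (ccAndXor hc)
        · simp only [List.foldr_cons]
          rw [hp'.2.2]
          exact ccOrXor hc
        · unfold ccSum at hsum' ⊢
          simp only [List.map_cons, List.sum_cons]
          rw [hsum', ← hv]
          congr 1
          unfold ccCost
          rw [← hd, PySem.Dict.getD_eq_get?_getD]

theorem ccBComplete (nums : List Int) (m : Nat) (d : PySem.Dict Nat Int)
    (hd : ∀ s, d.get? s = ccCanon nums m s) (hm : 1 ≤ m) :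
    ∀ fuel : Nat, ∀ {mask : Nat} {l : List Nat}, mask < fuel → ccPart nums m l mask →
      ∃ w, ccBestF fuel d (ccByLow d) mask = some w ∧ w ≤ ccSum nums m l := by
  intro fuel
  induction fuel with
  | zero => intro mask l h; omega
  | succ fuel ih =>
    intro mask l hlt hp
    rw [ccBestF]
    by_cases hmask0 : mask = 0
    · rw [if_pos hmask0]
      subst hmask0
      have hl := ccPartZeroNil hp
      subst hl
      exact ⟨0, rfl, by simp [ccSum]⟩
    · rw [if_neg hmask0]
      obtain ⟨hmb, -⟩ := ccLowIdxSpec hmask0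
      have hex : ∃ s ∈ l, s.testBit (ccLowIdx mask) = true := by
        have hor := ccTestBitFoldrOr l (ccLowIdx mask)
        rw [hp.2.2, hmb] at hor
        exact List.any_eq_true.mp hor.symm
      obtain ⟨s, hsl, hsb⟩ := hex
      have hs_canon : ccCanon nums m s ≠ none := hp.1 s hsl
      have hspos : 0 < s := ((ccCanonNeIff nums m s).mp hs_canon).1
      have hssub : s &&& mask = s := by
        rw [← hp.2.2]
        exact ccSubFoldrOr hsl
      have hlow : ccLowIdx s = ccLowIdx mask := ccLowEq (by omega) hssub hsb
      have hperm : l.Perm (s :: l.erase s) := List.perm_cons_erase hsl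
      have hsymm : ∀ {a b : Nat}, a &&& b = 0 → b &&& a = 0 := fun h => by
        rw [Nat.land_comm]; exact h
      have hpw' : (s :: l.erase s).Pairwise (fun a b => a &&& b = 0) :=
        (List.Perm.pairwise_iff hsymm hperm).mp hp.2.1
      have hlc : LeftCommutative (fun (a b : Nat) => a ||| b) :=
        ⟨fun a b c => by rw [← Nat.lor_assoc, ← Nat.lor_assoc, Nat.lor_comm a b]⟩
      have hfold' : ((s :: l.erase s).foldr (· ||| ·) 0 : Nat) = mask := by
        rw [← List.Perm.foldr_eq hperm 0]
        exact hp.2.2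
      have hsum' : ccSum nums m l = ccSum nums m (s :: l.erase s) := by
        unfold ccSum
        exact (hperm.map (ccCost nums m)).sum_eq
      have hdisj : s &&& ((l.erase s).foldr (· ||| ·) 0 : Nat) = 0 :=
        ccDisjFoldrOr (List.pairwise_cons.mp hpw').1
      have hfrest : ((l.erase s).foldr (· ||| ·) 0 : Nat) = mask ^^^ s := by
        have hfold2 : s ||| ((l.erase s).foldr (· ||| ·) 0 : Nat) = mask := hfold'
        rw [← hfold2]
        exact (ccXorOfOrDisj hdisj).symm
      have hprest : ccPart nums m (l.erase s) (mask ^^^ s) :=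
        ⟨fun t ht => hp.1 t (hperm.mem_iff.mpr (by simp [ht])),
          (List.pairwise_cons.mp hpw').2, hfrest⟩
      have hxlt : mask ^^^ s < mask := ccXorLt hssub (by omega)
      obtain ⟨w', hw', hle'⟩ := ih (by omega) hprest
      rw [ccFoldIf]
      have hkeys : s ∈ d.keys := by
        by_contra hnk
        exact hs_canon (by rw [← hd]; exact (PySem.Dict.get?_eq_none_iff_not_mem_keys d s).mpr hnk)
      have hmemb : s ∈ (ccByLow d).getD (ccLowIdx mask) [] :=
        (ccByLowMem d s (ccLowIdx mask)).mpr ⟨hkeys, hlow⟩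
      have hgs_val : (if s &&& mask = s then
          (ccBestF fuel d (ccByLow d) (mask ^^^ s)).map (fun w => d.getD s 0 + w) else none)
          = some (d.getD s 0 + w') := by
        rw [if_pos hssub, hw']
        rfl
      obtain ⟨v, hv, hvle⟩ := ccFMLe
        (g := fun t => if t &&& mask = t then
          (ccBestF fuel d (ccByLow d) (mask ^^^ t)).map (fun w => d.getD t 0 + w) else none)
        (Or.inr ⟨s, hmemb, hgs_val⟩)
      refine ⟨v, hv, ?_⟩
      have hcost : ccCost nums m s = d.getD s 0 := by
        unfold ccCost
        rw [← hd, PySem.Dict.getD_eq_get?_getD]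
      rw [hsum']
      calc v ≤ d.getD s 0 + w' := hvle
        _ ≤ d.getD s 0 + ccSum nums m (l.erase s) := by omega
        _ = ccSum nums m (s :: l.erase s) := by
            unfold ccSum
            simp only [List.map_cons, List.sum_cons]
            rw [hcost]

-- ---- the two DPs agree ----

theorem ccDPEq (nums : List Int) (m : Nat) (dA dB : PySem.Dict Nat Int)
    (hdA : ∀ s, dA.get? s = ccCanon nums m s) (hdB : ∀ s, dB.get? s = ccCanon nums m s)
    (hm : 1 ≤ m) (fuel mask : Nat) (hmask : mask ≠ 0) (hlt : mask < fuel) :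
    ccDfsF fuel dA mask = ccBestF fuel dB (ccByLow dB) mask := by
  have hlne : ∀ {l : List Nat}, ccPart nums m l mask → l ≠ [] := by
    rintro l hp rfl
    exact hmask hp.2.2.symm
  cases hA : ccDfsF fuel dA mask with
  | none =>
    cases hB : ccBestF fuel dB (ccByLow dB) mask with
    | none => rfl
    | some w =>
      obtain ⟨l, hp, -⟩ := ccBSound nums m dB hdB fuel hlt hB
      obtain ⟨w', hw', -⟩ := ccAComplete nums m dA hdA hm fuel hlt hp (hlne hp)
      rw [hA] at hw'
      cases hw'
  | some v =>
    cases hB : ccBestF fuel dB (ccByLow dB) mask with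
    | none =>
      obtain ⟨l, hp, -⟩ := ccASound nums m dA hdA fuel hlt hA
      obtain ⟨w', hw', -⟩ := ccBComplete nums m dB hdB hm fuel hlt hp
      rw [hB] at hw'
      cases hw'
    | some w =>
      obtain ⟨lA, hpA, hsA⟩ := ccASound nums m dA hdA fuel hlt hA
      obtain ⟨lB, hpB, hsB⟩ := ccBSound nums m dB hdB fuel hlt hB
      obtain ⟨w1, hw1, hle1⟩ := ccBComplete nums m dB hdB hm fuel hlt hpA
      obtain ⟨w2, hw2, hle2⟩ := ccAComplete nums m dA hdA hm fuel hlt hpB (hlne hpB)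
      rw [hB] at hw1
      rw [hA] at hw2
      have e1 : w = w1 := by injection hw1
      have e2 : v = w2 := by injection hw2
      rw [hsA] at hle1
      rw [hsB] at hle2
      have : v = w := le_antisymm (by omega) (by omega)
      rw [this]

-- ---- the duplicate-count guards agree ----

theorem ccDupSpec (k : Int) : ∀ (l pre : List Int), (∀ x ∈ pre, ((pre.count x : Nat) : Int) ≤ k) →
    (ccDupLoopA k l (PySem.Dict.counter pre) = true
      ↔ ∃ x ∈ pre ++ l, k < (((pre ++ l).count x : Nat) : Int)) := by
  intro l
  induction l with
  | nil =>
    intro pre hpre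
    constructor
    · intro h
      simp [ccDupLoopA] at h
    · rintro ⟨x, hx, hc⟩
      rw [List.append_nil] at hx hc
      exact absurd hc (not_lt.mpr (hpre x hx))
  | cons x rest ih =>
    intro pre hpre
    simp only [ccDupLoopA]
    have hd' : (PySem.Dict.counter pre).modify x 0 (· + 1) = PySem.Dict.counter (pre ++ [x]) :=
      (PySem.Dict.counter_append_singleton pre x).symm
    rw [hd']
    have hget : (PySem.Dict.counter (pre ++ [x])).getD x 0 = (((pre ++ [x]).count x : Nat) : Int) :=
      PySem.Dict.getD_counter _ x
    have hcnt1 : (pre ++ [x]).count x = pre.count x + 1 := by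
      simp [List.count_append]
    by_cases hk : k < (PySem.Dict.counter (pre ++ [x])).getD x 0
    · rw [if_pos hk]
      rw [hget, hcnt1] at hk
      constructor
      · intro _
        refine ⟨x, by simp, ?_⟩
        have : (pre ++ x :: rest).count x = pre.count x + 1 + rest.count x := by
          simp [List.count_append, List.count_cons]
          omega
        rw [this]
        push_cast at hk ⊢
        omega
      · intro _; rfl
    · rw [if_neg hk]
      rw [hget, hcnt1] at hk
      have hpre' : ∀ y ∈ pre ++ [x], (((pre ++ [x]).count y : Nat) : Int) ≤ k := by
        intro y hy'
        by_cases hy : y = x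
        · subst hy
          rw [hcnt1]
          push_cast
          push_cast at hk
          omega
        · have heq : (pre ++ [x]).count y = pre.count y := by
            simp [List.count_append, List.count_singleton]
            exact fun h => hy h.symm
          rw [heq]
          rcases List.mem_append.mp hy' with h | h
          · exact hpre y h
          · simp at h; exact absurd h hy
      have := ih (pre ++ [x]) hpre'
      rw [this]
      constructor
      · rintro ⟨y, hy, hc⟩
        refine ⟨y, ?_, ?_⟩
        · simpa [List.append_assoc] using hy
        · have : (pre ++ [x]) ++ rest = pre ++ x :: rest := by simp
          rwa [this] at hc
      · rintro ⟨y, hy, hc⟩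
        refine ⟨y, ?_, ?_⟩
        · simpa [List.append_assoc] using hy
        · have : (pre ++ [x]) ++ rest = pre ++ x :: rest := by simp
          rwa [this]

theorem ccDupTop (nums : List Int) (k : Int) :
    (ccDupLoopA k nums PySem.Dict.empty = true ↔ ∃ x ∈ nums, k < ((nums.count x : Nat) : Int)) := by
  have h0 : (PySem.Dict.counter ([] : List Int)) = PySem.Dict.empty := rfl
  have := ccDupSpec k nums [] (by intro x hx; cases hx)
  rw [h0] at this
  simpa using this

theorem ccCntSpec (nums : List Int) (k : Int) :
    ((ccCntB nums).keys.any (fun x => decide (k < (ccCntB nums).getD x 0)) = true)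
      ↔ ∃ x ∈ nums, k < ((nums.count x : Nat) : Int) := by
  have hcnt : ccCntB nums = PySem.Dict.counter nums := by
    unfold ccCntB
    exact PySem.Dict.foldl_insert_getD_add_one_eq_counter nums
  rw [hcnt, List.any_eq_true]
  constructor
  · rintro ⟨x, hxk, hdec⟩
    rw [PySem.Dict.keys_counter] at hxk
    refine ⟨x, (PySem.Set.mem_ofList _ _).mp hxk, ?_⟩
    rw [PySem.Dict.getD_counter] at hdec
    exact of_decide_eq_true hdec
  · rintro ⟨x, hx, hc⟩
    refine ⟨x, ?_, ?_⟩
    · rw [PySem.Dict.keys_counter]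
      exact (PySem.Set.mem_ofList _ _).mpr hx
    · rw [PySem.Dict.getD_counter]
      exact decide_eq_true hc

-- ===== VERDICT (by name: the statement is the Claim_ definition above) =====
theorem calculate_cuts_spec : Claim_equal_calculate_cuts := by
  unfold Claim_equal_calculate_cuts
  intro nums k _ hpre
  unfold Spec_calculate_cuts
  obtain ⟨hne, hcases⟩ := hpre
  by_cases hdup : ∃ x ∈ nums, k < ((nums.count x : Nat) : Int)
  · have hA : ccDupLoopA k nums PySem.Dict.empty = true := (ccDupTop nums k).mpr hdup
    have hB : (ccCntB nums).keys.any (fun x => decide (k < (ccCntB nums).getD x 0)) = true :=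
      (ccCntSpec nums k).mpr hdup
    simp only [calculate_cuts, calculate_cuts_alt, hA, hB, if_true]
  · have h1 : ¬ k ≤ 0 := by
      intro hk0
      apply hdup
      obtain ⟨x, hx⟩ := List.exists_mem_of_ne_nil nums hne
      have hcp : 0 < nums.count x := List.count_pos_iff.mpr hx
      exact ⟨x, hx, by push_cast; omega⟩
    have hkn : k ≤ (nums.length : Int) := by
      rcases hcases with h | h | h
      · exact absurd h h1
      · exact h
      · exact absurd h hdup
    have hA : ccDupLoopA k nums PySem.Dict.empty = false :=
      Bool.eq_false_iff.mpr (fun h => hdup ((ccDupTop nums k).mp h))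
    have hB : (ccCntB nums).keys.any (fun x => decide (k < (ccCntB nums).getD x 0)) = false :=
      Bool.eq_false_iff.mpr (fun h => hdup ((ccCntSpec nums k).mp h))
    simp only [calculate_cuts, calculate_cuts_alt, hA, hB, Bool.false_eq_true, if_false]
    have hm1 : 1 ≤ (PySem.Int.floordiv (nums.length : Int) k).toNat := by
      have hfd : (1 : Int) ≤ PySem.Int.floordiv (nums.length : Int) k := by
        rw [PySem.Int.le_floordiv_iff_mul_le (by omega : (0:Int) < k)]
        omega
      omega
    have hn1 : 1 ≤ nums.length := by
      have : nums.length ≠ 0 := fun h => hne (List.eq_nil_of_length_eq_zero h)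
      omega
    have h2n : 2 ≤ 2 ^ nums.length := by
      calc (2:Nat) = 2 ^ 1 := rfl
        _ ≤ 2 ^ nums.length := Nat.pow_le_pow_right (by norm_num) hn1
    have hfull0 : (1 <<< nums.length) - 1 ≠ 0 := by
      rw [Nat.shiftLeft_eq, one_mul]
      omega
    have hfull_lt : (1 <<< nums.length) - 1 < 1 <<< nums.length := by
      rw [Nat.shiftLeft_eq, one_mul]
      omega
    rw [ccDPEq nums ((PySem.Int.floordiv (nums.length : Int) k).toNat)
      (ccBuildA nums ((PySem.Int.floordiv (nums.length : Int) k).toNat)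
        (ccCombos ((PySem.Int.floordiv (nums.length : Int) k).toNat) (List.range nums.length)))
      (ccBuildB nums ((PySem.Int.floordiv (nums.length : Int) k).toNat))
      (fun s => ccBuildAChar nums hm1 s)
      (fun s => ccBuildBChar nums _ s)
      hm1 (1 <<< nums.length) ((1 <<< nums.length) - 1) hfull0 hfull_lt]

@[simp]
theorem calculate_cuts_raises : Claim_raises_calculate_cuts := by
  unfold Claim_raises_calculate_cuts
  constructor
  · intro nums k _ hr hpre
    obtain ⟨hne, hcases⟩ := hpre
    rcases hr with ⟨hnil, -⟩ | ⟨hkpos, hklen⟩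
    · exact hne hnil
    · rcases hcases with h | h | ⟨x, hx, hcnt⟩
      · omega
      · omega
      · have hcle : nums.count x ≤ nums.length := List.count_le_length
        have hci : ((nums.count x : Nat) : Int) ≤ (nums.length : Int) := by exact_mod_cast hcle
        omega
  · exact ⟨by decide, by decide, by decide⟩
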